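-- pv_equiv track=rewrite | github.com/lanl/qhat | qre/jkg_utils.py | pauli_product_key
-- ===== SOURCE A (Python) =====
-- def pauli_dict(pauli_key):
--     """Convert a tuple of (qubit, operator) pairs into a dictionary."""
--     return {q: op for (q, op) in pauli_key}
--
-- def pauli_product(p1, p2):
--     """
--     Multiply two single-qubit Pauli operators (ignoring phase).
--     """
--     if p1 == 'I':
--         return p2
--     if p2 == 'I':
--         return p1
--     if p1 == p2:
--         return 'I'
--     # For different Paulis, the unique remaining operator is returned.
--     if {p1, p2} == {'X', 'Y'}:
--         return 'Z'
--     if {p1, p2} == {'X', 'Z'}: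
--         return 'Y'
--     if {p1, p2} == {'Y', 'Z'}:
--         return 'X'
--     return 'I'
--
-- def pauli_product_key(key1, key2):
--     """
--     Given two Pauli strings (each represented as a tuple of (qubit, op)),
--     return the Pauli string (as a sorted tuple) corresponding to their product.
--     The product is computed qubit-by-qubit (ignoring any phase).
--     """
--     d1 = pauli_dict(key1)
--     d2 = pauli_dict(key2)
--     prod = {}
--     for q in set(d1.keys()).union(d2.keys()):
--         op1 = d1.get(q, 'I')
--         op2 = d2.get(q, 'I')
--         prod[q] = pauli_product(op1, op2)
--     # Remove qubits where the product is identity.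
--     prod = {q: op for q, op in prod.items() if op != 'I'}
--     return tuple(sorted(prod.items()))
-- ===== SOURCE B (Python) =====
-- # Two-pointer merge of the two qubit-sorted Pauli strings: the product comes out
-- # already sorted, with no key-union set, no product dict and no final sort.
-- _MUL = {('X', 'Y'): 'Z', ('Y', 'X'): 'Z',
--         ('X', 'Z'): 'Y', ('Z', 'X'): 'Y',
--         ('Y', 'Z'): 'X', ('Z', 'Y'): 'X'}
--
--
-- def pauli_product_key(key1, key2):
--     a = sorted(dict(key1).items())
--     b = sorted(dict(key2).items())
--     out = []
--     i = j = 0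
--     while i < len(a) or j < len(b):
--         if j >= len(b) or (i < len(a) and a[i][0] < b[j][0]):
--             q, op = a[i]
--             i += 1
--         elif i >= len(a) or b[j][0] < a[i][0]:
--             q, op = b[j]
--             j += 1
--         else:
--             q, op1, op2 = a[i][0], a[i][1], b[j][1]
--             op = op2 if op1 == 'I' else op1 if op2 == 'I' else _MUL.get((op1, op2), 'I')
--             i += 1
--             j += 1
--         if op != 'I':
--             out.append((q, op))
--     return tuple(out)
-- ===== Notes on version B (the rewrite author's own statement) =====
-- stated objective: alternative
-- what changed: Replaces A's hash-set key union, per-qubit branch-cascade product, intermediate product dicts and final sort with a two-pointer merge of the two qubit-sorted strings that multiplies matching qubits via a pair-keyed lookup table and emits the result already in sorted order.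
import Mathlib
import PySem

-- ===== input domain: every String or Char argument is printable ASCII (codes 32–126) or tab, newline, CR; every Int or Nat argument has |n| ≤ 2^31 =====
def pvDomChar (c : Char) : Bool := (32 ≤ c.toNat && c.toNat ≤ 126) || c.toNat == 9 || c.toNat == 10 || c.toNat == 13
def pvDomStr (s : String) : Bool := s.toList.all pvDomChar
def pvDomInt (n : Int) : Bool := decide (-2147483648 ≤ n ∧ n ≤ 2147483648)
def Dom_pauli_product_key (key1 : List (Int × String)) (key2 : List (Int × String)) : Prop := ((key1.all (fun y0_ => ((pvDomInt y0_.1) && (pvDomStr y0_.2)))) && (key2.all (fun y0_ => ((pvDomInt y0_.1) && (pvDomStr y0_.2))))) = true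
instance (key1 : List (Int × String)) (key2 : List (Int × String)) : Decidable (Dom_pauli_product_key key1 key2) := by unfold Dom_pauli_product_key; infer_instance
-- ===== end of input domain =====

-- B merges the two qubit-sorted Pauli strings with two pointers, multiplying where the
-- qubits match via a pair-keyed product table, so the result comes out already sorted:
-- no key-union set, no product dict and no final sort (same asymptotics; no speed claim).

-- ===== PORT A =====
-- {q: op for (q, op) in pauli_key} : dict comprehension = insert loop over the pairs
def pauli_dict (pauli_key : List (Int × String)) : PySem.Dict Int String :=
  pauli_key.foldl (fun d p => d.insert p.1 p.2) PySem.Dict.empty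

-- '{p1, p2} == {"X", "Y"}' is ported by hand as the disjunction shown: for distinct
-- literals x ≠ y, {p1,p2} == {x,y} holds iff (p1=x ∧ p2=y) ∨ (p1=y ∧ p2=x) — exact.
def pauli_product (p1 : String) (p2 : String) : String :=
  if p1 = "I" then p2
  else if p2 = "I" then p1
  else if p1 = p2 then "I"
  else if (p1 = "X" ∧ p2 = "Y") ∨ (p1 = "Y" ∧ p2 = "X") then "Z"
  else if (p1 = "X" ∧ p2 = "Z") ∨ (p1 = "Z" ∧ p2 = "X") then "Y"
  else if (p1 = "Y" ∧ p2 = "Z") ∨ (p1 = "Z" ∧ p2 = "Y") then "X"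
  else "I"

def pauli_product_key (key1 : List (Int × String)) (key2 : List (Int × String)) : List (Int × String) :=
  let d1 := pauli_dict key1
  let d2 := pauli_dict key2
  -- set(d1.keys()).union(d2.keys()); the loop over it is order-insensitive here
  -- (unique keys, value a function of the key, result sorted), so insertion order is exact
  let u := PySem.Set.union (PySem.Set.ofList d1.keys) d2.keys
  let prod := u.foldl (fun d q => d.insert q (pauli_product (d1.getD q "I") (d2.getD q "I"))) PySem.Dict.empty
  -- {q: op for q, op in prod.items() if op != 'I'} : insert loop over the filtered items
  let prod2 := (prod.items.filter (fun p => p.2 != "I")).foldl (fun d p => d.insert p.1 p.2) PySem.Dict.empty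
  PySem.List.sorted2 prod2.items (·.1) (·.2)

-- ===== PORT B =====
def pvMUL : PySem.Dict (String × String) String :=
  PySem.Dict.ofList [(("X", "Y"), "Z"), (("Y", "X"), "Z"),
                     (("X", "Z"), "Y"), (("Z", "X"), "Y"),
                     (("Y", "Z"), "X"), (("Z", "Y"), "X")]

-- Source B's inline "op2 if op1 == 'I' else op1 if op2 == 'I' else _MUL.get((op1, op2), 'I')"
def pauli_mul_alt (op1 : String) (op2 : String) : String :=
  if op1 = "I" then op2 else if op2 = "I" then op1 else pvMUL.getD (op1, op2) "I"

-- "if op != 'I': out.append((q, op))" of the loop body (output built front-to-back)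
def pvConsIf (p : Int × String) (r : List (Int × String)) : List (Int × String) :=
  if p.2 != "I" then p :: r else r

-- the while loop over indices i, j, as recursion over the corresponding suffixes;
-- branch order matches Source B (b exhausted / a exhausted or b smaller / equal qubits)
def pvMerge : List (Int × String) → List (Int × String) → List (Int × String)
  | [], [] => []
  | x :: a, [] => pvConsIf x (pvMerge a [])
  | [], y :: b => pvConsIf y (pvMerge [] b)
  | x :: a, y :: b =>
      if x.1 < y.1 then pvConsIf x (pvMerge a (y :: b))
      else if y.1 < x.1 then pvConsIf y (pvMerge (x :: a) b)
      else pvConsIf (x.1, pauli_mul_alt x.2 y.2) (pvMerge a b)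
  termination_by a b => a.length + b.length
  decreasing_by all_goals (simp only [List.length_cons]; omega)

def pauli_product_key_alt (key1 : List (Int × String)) (key2 : List (Int × String)) : List (Int × String) :=
  -- sorted(dict(key).items()) : Python sorts the pairs, i.e. by (qubit, op)
  let a := PySem.List.sorted2 (PySem.Dict.ofList key1).items (·.1) (·.2)
  let b := PySem.List.sorted2 (PySem.Dict.ofList key2).items (·.1) (·.2)
  pvMerge a b

-- ===== PRECONDITION & SPEC =====
def Spec_pauli_product_key (key1 : List (Int × String)) (key2 : List (Int × String)) (out : List (Int × String)) : Prop := out = pauli_product_key_alt key1 key2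
instance (key1 : List (Int × String)) (key2 : List (Int × String)) (out : List (Int × String)) : Decidable (Spec_pauli_product_key key1 key2 out) := by unfold Spec_pauli_product_key; infer_instance

-- ===== CLAIM (what is proved, stated in full; the proofs are below) =====
def Claim_equal_pauli_product_key : Prop := ∀ (key1 : List (Int × String)) (key2 : List (Int × String)), Dom_pauli_product_key key1 key2 → Spec_pauli_product_key key1 key2 (pauli_product_key key1 key2)

-- ===== LEMMAS AND PROOFS =====

-- the two single-qubit products agree on every pair of strings
lemma pauli_mul_agree (a b : String) : pauli_product a b = pauli_mul_alt a b := by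
  unfold pauli_product pauli_mul_alt pvMUL
  by_cases ha0 : a = "I" <;> by_cases hb0 : b = "I" <;>
    by_cases ha1 : a = "X" <;> by_cases ha2 : a = "Y" <;> by_cases ha3 : a = "Z" <;>
    by_cases hb1 : b = "X" <;> by_cases hb2 : b = "Y" <;> by_cases hb3 : b = "Z" <;>
    simp_all [PySem.Dict.ofList, PySem.Dict.update, List.foldl, PySem.Dict.getD_insert,
      PySem.Dict.getD_empty, Prod.ext_iff]

-- sorted2 with the pair key equals sorted by the first key when first keys are unique
lemma insertBy_congr {α : Type} (b1 b2 : α → α → Bool) (x : α) (l : List α)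
    (h : ∀ y ∈ l, b1 x y = b2 x y) :
    PySem.List.insertBy b1 x l = PySem.List.insertBy b2 x l := by
  induction l with
  | nil => rfl
  | cons y t ih =>
      simp only [PySem.List.insertBy, h y (by simp)]
      by_cases hc : b2 x y = true
      · simp [hc]
      · simp [hc, ih (fun z hz => h z (by simp [hz]))]

lemma foldl_insertBy_congr {α : Type} (b1 b2 : α → α → Bool) (S : List α)
    (hb : ∀ x ∈ S, ∀ y ∈ S, b1 x y = b2 x y) :
    ∀ (xs acc : List α), (∀ x ∈ xs, x ∈ S) → (∀ x ∈ acc, x ∈ S) →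
    xs.foldl (fun a x => PySem.List.insertBy b1 x a) acc
      = xs.foldl (fun a x => PySem.List.insertBy b2 x a) acc := by
  intro xs
  induction xs with
  | nil => intro acc _ _; rfl
  | cons x t ih =>
      intro acc hxs hacc
      simp only [List.foldl_cons]
      rw [insertBy_congr b1 b2 x acc (fun y hy => hb x (hxs x (by simp)) y (hacc y hy))]
      exact ih _ (fun z hz => hxs z (by simp [hz]))
        (fun z hz => by
          rcases (PySem.List.insertBy_mem_iff b2 x z acc).1 hz with h | h
          · exact h ▸ hxs x (by simp)
          · exact hacc z h)

lemma sorted2_eq_sorted_fst (xs : List (Int × String))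
    (h : ∀ x ∈ xs, ∀ y ∈ xs, x.1 = y.1 → x = y) :
    PySem.List.sorted2 xs (·.1) (·.2) = PySem.List.sorted xs (·.1) := by
  show xs.foldl (fun acc x => PySem.List.insertBy _ x acc) []
      = xs.foldl (fun acc x => PySem.List.insertBy _ x acc) []
  apply foldl_insertBy_congr _ _ xs _ xs [] (fun z hz => hz) (by simp)
  intro x hx y hy
  by_cases hxy : x = y
  · subst hxy; simp
  · have hne : x.1 ≠ y.1 := fun he => hxy (h x hx y hy he)
    by_cases hlt : x.1 < y.1
    · simp [hlt]
    · have : ¬ (x.1 : Int) < y.1 := hlt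
      have h2 : (y.1 : Int) < x.1 := lt_of_le_of_ne (not_lt.1 hlt) (Ne.symm hne)
      simp [hlt, h2]

-- first-match lookup with default "I" (proof-side model of both dicts' getD)
def lkD : List (Int × String) → Int → String
  | [], _ => "I"
  | p :: t, q => if p.1 = q then p.2 else lkD t q

lemma lkD_of_not_mem (l : List (Int × String)) (q : Int) (h : q ∉ l.map Prod.fst) :
    lkD l q = "I" := by
  induction l with
  | nil => rfl
  | cons p t ih =>
      have h1 : ¬ p.1 = q := fun hc => h (by simp [hc.symm])
      have h2 : q ∉ t.map Prod.fst := fun hc => h (by simp [hc])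
      simp [lkD, h1, ih h2]

lemma lkD_of_mem (l : List (Int × String)) (q : Int) (v : String)
    (hm : (q, v) ∈ l) (hnd : (l.map Prod.fst).Nodup) : lkD l q = v := by
  induction l with
  | nil => simp at hm
  | cons p t ih =>
      simp only [List.map_cons, List.nodup_cons] at hnd
      rcases List.mem_cons.1 hm with h | h
      · simp [lkD, ← h]
      · have hq : p.1 ≠ q := by
          intro he
          exact hnd.1 (he ▸ (List.mem_map.2 ⟨(q, v), h, rfl⟩))
        simp [lkD, hq, ih h hnd.2]

lemma lkD_eq_getD (d : PySem.Dict Int String) (l : List (Int × String))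
    (hp : l.Perm d.items) (q : Int) (hnd : d.keys.Nodup) : lkD l q = d.getD q "I" := by
  have hmapfst : l.map Prod.fst = l.map (·.1) := rfl
  have hkeys : d.keys = d.items.map (·.1) := rfl
  have hndl : (l.map Prod.fst).Nodup := ((hp.map Prod.fst).nodup_iff).2 (hkeys ▸ hnd)
  by_cases hq : q ∈ d.keys
  · have : (q, d.getD q "I") ∈ d.items := by
      rw [PySem.Dict.items_eq_map_keys d hnd "I"]
      exact List.mem_map.2 ⟨q, hq, rfl⟩
    exact lkD_of_mem l q _ (hp.mem_iff.2 this) hndl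
  · have : q ∉ l.map Prod.fst := by
      intro hc
      exact hq (hkeys ▸ ((hp.map Prod.fst).mem_iff.1 hc))
    rw [lkD_of_not_mem l q this]
    have hcf : d.contains q = false := by
      rcases Bool.eq_false_or_eq_true (d.contains q) with h | h
      · exact absurd ((PySem.Dict.contains_iff_mem_keys d q).1 h) hq
      · exact h
    exact (PySem.Dict.getD_of_not_contains d "I" hcf).symm

-- keys appearing in the merge come from one of the two inputs
lemma pvMerge_key_mem (la lb : List (Int × String)) (p : Int × String)
    (hm : p ∈ pvMerge la lb) : p.1 ∈ la.map Prod.fst ∨ p.1 ∈ lb.map Prod.fst := by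
  induction la, lb using pvMerge.induct with
  | case1 => simp [pvMerge] at hm
  | case2 x a ih =>
      rw [pvMerge, pvConsIf] at hm
      split at hm
      · rcases List.mem_cons.1 hm with h | h
        · subst h; simp
        · rcases ih h with h | h
          · exact Or.inl (by simp [h])
          · exact Or.inr h
      · rcases ih hm with h | h
        · exact Or.inl (by simp [h])
        · exact Or.inr h
  | case3 y b ih =>
      rw [pvMerge, pvConsIf] at hm
      split at hm
      · rcases List.mem_cons.1 hm with h | h
        · subst h; simp
        · rcases ih h with h | h
          · exact Or.inl h
          · exact Or.inr (by simp [h])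
      · rcases ih hm with h | h
        · exact Or.inl h
        · exact Or.inr (by simp [h])
  | case4 x a y b hxy ih =>
      rw [pvMerge, if_pos hxy, pvConsIf] at hm
      have step : p ∈ pvMerge a (y :: b) → _ := ih
      split at hm
      · rcases List.mem_cons.1 hm with h | h
        · subst h; simp
        · rcases ih h with h | h
          · exact Or.inl (by simp [h])
          · exact Or.inr h
      · rcases ih hm with h | h
        · exact Or.inl (by simp [h])
        · exact Or.inr h
  | case5 x a y b hxy hyx ih =>
      rw [pvMerge, if_neg hxy, if_pos hyx, pvConsIf] at hm
      split at hm
      · rcases List.mem_cons.1 hm with h | h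
        · subst h; simp
        · rcases ih h with h | h
          · exact Or.inl h
          · exact Or.inr (by simp [h])
      · rcases ih hm with h | h
        · exact Or.inl h
        · exact Or.inr (by simp [h])
  | case6 x a y b hxy hyx ih =>
      rw [pvMerge, if_neg hxy, if_neg hyx, pvConsIf] at hm
      split at hm
      · rcases List.mem_cons.1 hm with h | h
        · subst h; simp
        · rcases ih h with h | h
          · exact Or.inl (by simp [h])
          · exact Or.inr (by simp [h])
      · rcases ih hm with h | h
        · exact Or.inl (by simp [h])
        · exact Or.inr (by simp [h])

lemma pvConsIf_pairwise (p : Int × String) (r : List (Int × String))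
    (hr : r.Pairwise (fun u v => u.1 < v.1)) (hall : ∀ z ∈ r, p.1 < z.1) :
    (pvConsIf p r).Pairwise (fun u v => u.1 < v.1) := by
  unfold pvConsIf
  split
  · exact List.Pairwise.cons hall hr
  · exact hr

-- the merge is strictly increasing in the qubit when both inputs are
lemma pvMerge_pairwise (la lb : List (Int × String))
    (hla : la.Pairwise (fun u v => u.1 < v.1)) (hlb : lb.Pairwise (fun u v => u.1 < v.1)) :
    (pvMerge la lb).Pairwise (fun u v => u.1 < v.1) := by
  induction la, lb using pvMerge.induct with
  | case1 => simp [pvMerge]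
  | case2 x a ih =>
      rw [pvMerge]
      refine pvConsIf_pairwise _ _ (ih (List.Pairwise.sublist (List.sublist_cons_self x a) hla) hlb) ?_
      intro z hz
      rcases pvMerge_key_mem a [] z hz with h | h
      · rcases List.mem_map.1 h with ⟨w, hw, he⟩
        exact he ▸ (List.pairwise_cons.1 hla).1 w hw
      · simp at h
  | case3 y b ih =>
      rw [pvMerge]
      refine pvConsIf_pairwise _ _ (ih hla (List.Pairwise.sublist (List.sublist_cons_self y b) hlb)) ?_
      intro z hz
      rcases pvMerge_key_mem [] b z hz with h | h
      · simp at h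
      · rcases List.mem_map.1 h with ⟨w, hw, he⟩
        exact he ▸ (List.pairwise_cons.1 hlb).1 w hw
  | case4 x a y b hxy ih =>
      rw [pvMerge, if_pos hxy]
      refine pvConsIf_pairwise _ _ (ih (List.Pairwise.sublist (List.sublist_cons_self x a) hla) hlb) ?_
      intro z hz
      rcases pvMerge_key_mem a (y :: b) z hz with h | h
      · rcases List.mem_map.1 h with ⟨w, hw, he⟩
        exact he ▸ (List.pairwise_cons.1 hla).1 w hw
      · rcases List.mem_map.1 h with ⟨w, hw, he⟩
        rcases List.mem_cons.1 hw with h' | h'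
        · exact he ▸ h' ▸ hxy
        · exact he ▸ lt_trans hxy ((List.pairwise_cons.1 hlb).1 w h')
  | case5 x a y b hxy hyx ih =>
      rw [pvMerge, if_neg hxy, if_pos hyx]
      refine pvConsIf_pairwise _ _ (ih hla (List.Pairwise.sublist (List.sublist_cons_self y b) hlb)) ?_
      intro z hz
      rcases pvMerge_key_mem (x :: a) b z hz with h | h
      · rcases List.mem_map.1 h with ⟨w, hw, he⟩
        rcases List.mem_cons.1 hw with h' | h'
        · exact he ▸ h' ▸ hyx
        · exact he ▸ lt_trans hyx ((List.pairwise_cons.1 hla).1 w h')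
      · rcases List.mem_map.1 h with ⟨w, hw, he⟩
        exact he ▸ (List.pairwise_cons.1 hlb).1 w hw
  | case6 x a y b hxy hyx ih =>
      rw [pvMerge, if_neg hxy, if_neg hyx]
      have hkey : x.1 = y.1 := le_antisymm (not_lt.1 hyx) (not_lt.1 hxy)
      refine pvConsIf_pairwise _ _
        (ih (List.Pairwise.sublist (List.sublist_cons_self x a) hla)
            (List.Pairwise.sublist (List.sublist_cons_self y b) hlb)) ?_
      intro z hz
      rcases pvMerge_key_mem a b z hz with h | h
      · rcases List.mem_map.1 h with ⟨w, hw, he⟩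
        exact he ▸ (List.pairwise_cons.1 hla).1 w hw
      · rcases List.mem_map.1 h with ⟨w, hw, he⟩
        exact he ▸ hkey ▸ (List.pairwise_cons.1 hlb).1 w hw

lemma not_mem_of_pairwise_head {x : Int × String} {t : List (Int × String)}
    (h : (x :: t).Pairwise (fun u v => u.1 < v.1)) : x.1 ∉ t.map Prod.fst := by
  intro hc
  rcases List.mem_map.1 hc with ⟨w, hw, he⟩
  exact absurd (he ▸ (List.pairwise_cons.1 h).1 w hw) (lt_irrefl x.1)

-- pauli_mul_alt with an absent qubit on the right returns the left operator (if non-I)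
lemma pauli_mul_alt_right_I (v : String) (h : v ≠ "I") : pauli_mul_alt v "I" = v := by
  simp [pauli_mul_alt, h]

lemma pauli_mul_alt_left_I (v : String) : pauli_mul_alt "I" v = v := by
  simp [pauli_mul_alt]

-- membership in pvConsIf
lemma pvConsIf_mem_iff (z p : Int × String) (r : List (Int × String)) :
    p ∈ pvConsIf z r ↔ ((p = z ∧ z.2 ≠ "I") ∨ p ∈ r) := by
  unfold pvConsIf
  split <;> rename_i h
  · have hz : z.2 ≠ "I" := by simpa using h
    simp [hz]
  · have hz : z.2 = "I" := by simpa using h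
    simp [hz]

-- the clause a key-matching head contributes to the membership characterisation
lemma key_eq_clause_left (p x : Int × String) (hq : p.1 = x.1) :
    ((p = x ∧ x.2 ≠ "I") ↔ (p.2 = pauli_mul_alt x.2 "I" ∧ p.2 ≠ "I")) := by
  constructor
  · rintro ⟨rfl, hx2⟩
    exact ⟨(pauli_mul_alt_right_I _ hx2).symm, hx2⟩
  · rintro ⟨hv, hne⟩
    have hx2 : x.2 ≠ "I" := by
      intro he
      rw [he] at hv
      exact hne (by simpa [pauli_mul_alt_left_I] using hv)
    rw [pauli_mul_alt_right_I _ hx2] at hv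
    exact ⟨Prod.ext hq hv, hx2⟩

lemma key_eq_clause_right (p y : Int × String) (hq : p.1 = y.1) :
    ((p = y ∧ y.2 ≠ "I") ↔ (p.2 = pauli_mul_alt "I" y.2 ∧ p.2 ≠ "I")) := by
  rw [pauli_mul_alt_left_I]
  constructor
  · rintro ⟨rfl, hy2⟩
    exact ⟨rfl, hy2⟩
  · rintro ⟨hv, hne⟩
    exact ⟨Prod.ext hq hv, hv ▸ hne⟩

lemma lkD_cons_self {x : Int × String} {t : List (Int × String)} {q : Int} (hq : q = x.1) :
    lkD (x :: t) q = x.2 := by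
  simp [lkD, hq.symm]

lemma lkD_cons_ne {x : Int × String} {t : List (Int × String)} {q : Int} (hq : q ≠ x.1) :
    lkD (x :: t) q = lkD t q := by
  have hx : ¬ x.1 = q := fun h => hq h.symm
  simp [lkD, hx]

lemma lkD_nil (q : Int) : lkD [] q = "I" := rfl

-- full membership characterisation of the merge
lemma pvMerge_mem (la lb : List (Int × String))
    (hla : la.Pairwise (fun u v => u.1 < v.1)) (hlb : lb.Pairwise (fun u v => u.1 < v.1))
    (p : Int × String) :
    p ∈ pvMerge la lb ↔ ((p.1 ∈ la.map Prod.fst ∨ p.1 ∈ lb.map Prod.fst) ∧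
      p.2 = pauli_mul_alt (lkD la p.1) (lkD lb p.1) ∧ p.2 ≠ "I") := by
  induction la, lb using pvMerge.induct with
  | case1 => simp [pvMerge]
  | case2 x a ih =>
      rw [pvMerge, pvConsIf_mem_iff,
        ih (List.Pairwise.sublist (List.sublist_cons_self x a) hla) List.Pairwise.nil]
      by_cases hq : p.1 = x.1
      · have hna : p.1 ∉ a.map Prod.fst := by rw [hq]; exact not_mem_of_pairwise_head hla
        have hmem : p.1 ∈ (x :: a).map Prod.fst := by
          rw [List.map_cons, hq]; exact List.mem_cons.2 (Or.inl rfl)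
        rw [lkD_cons_self hq, lkD_nil]
        constructor
        · rintro (h | h)
          · exact ⟨Or.inl hmem, (key_eq_clause_left p x hq).1 h⟩
          · rcases h.1 with h' | h'
            · exact absurd h' hna
            · simp at h'
        · rintro ⟨_, hv⟩
          exact Or.inl ((key_eq_clause_left p x hq).2 hv)
      · rw [lkD_cons_ne hq]
        have hpx : p ≠ x := fun h => hq (by rw [h])
        simp [hq, hpx]
  | case3 y b ih =>
      rw [pvMerge, pvConsIf_mem_iff,
        ih List.Pairwise.nil (List.Pairwise.sublist (List.sublist_cons_self y b) hlb)]
      by_cases hq : p.1 = y.1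
      · have hnb : p.1 ∉ b.map Prod.fst := by rw [hq]; exact not_mem_of_pairwise_head hlb
        have hmem : p.1 ∈ (y :: b).map Prod.fst := by
          rw [List.map_cons, hq]; exact List.mem_cons.2 (Or.inl rfl)
        rw [lkD_cons_self hq, lkD_nil]
        constructor
        · rintro (h | h)
          · exact ⟨Or.inr hmem, (key_eq_clause_right p y hq).1 h⟩
          · rcases h.1 with h' | h'
            · simp at h'
            · exact absurd h' hnb
        · rintro ⟨_, hv⟩
          exact Or.inl ((key_eq_clause_right p y hq).2 hv)
      · rw [lkD_cons_ne hq]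
        have hpy : p ≠ y := fun h => hq (by rw [h])
        simp [hq, hpy]
  | case4 x a y b hxy ih =>
      rw [pvMerge, if_pos hxy, pvConsIf_mem_iff,
        ih (List.Pairwise.sublist (List.sublist_cons_self x a) hla) hlb]
      by_cases hq : p.1 = x.1
      · have hna : p.1 ∉ a.map Prod.fst := by rw [hq]; exact not_mem_of_pairwise_head hla
        have hnyb : p.1 ∉ (y :: b).map Prod.fst := by
          rw [hq]
          simp only [List.map_cons, List.mem_cons]
          rintro (h | h)
          · exact absurd h (ne_of_lt hxy)
          · rcases List.mem_map.1 h with ⟨w, hw, he⟩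
            have hlt : x.1 < w.1 := lt_trans hxy ((List.pairwise_cons.1 hlb).1 w hw)
            omega
        have hmem : p.1 ∈ (x :: a).map Prod.fst := by
          rw [List.map_cons, hq]; exact List.mem_cons.2 (Or.inl rfl)
        rw [lkD_cons_self hq, lkD_of_not_mem _ _ hnyb]
        constructor
        · rintro (h | h)
          · exact ⟨Or.inl hmem, (key_eq_clause_left p x hq).1 h⟩
          · rcases h.1 with h' | h'
            · exact absurd h' hna
            · exact absurd h' hnyb
        · rintro ⟨_, hv⟩
          exact Or.inl ((key_eq_clause_left p x hq).2 hv)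
      · rw [lkD_cons_ne hq]
        have hpx : p ≠ x := fun h => hq (by rw [h])
        simp [hq, hpx]
  | case5 x a y b hxy hyx ih =>
      rw [pvMerge, if_neg hxy, if_pos hyx, pvConsIf_mem_iff,
        ih hla (List.Pairwise.sublist (List.sublist_cons_self y b) hlb)]
      by_cases hq : p.1 = y.1
      · have hnb : p.1 ∉ b.map Prod.fst := by rw [hq]; exact not_mem_of_pairwise_head hlb
        have hnxa : p.1 ∉ (x :: a).map Prod.fst := by
          rw [hq]
          simp only [List.map_cons, List.mem_cons]
          rintro (h | h)
          · exact absurd h (ne_of_lt hyx)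
          · rcases List.mem_map.1 h with ⟨w, hw, he⟩
            have hlt : y.1 < w.1 := lt_trans hyx ((List.pairwise_cons.1 hla).1 w hw)
            omega
        have hmem : p.1 ∈ (y :: b).map Prod.fst := by
          rw [List.map_cons, hq]; exact List.mem_cons.2 (Or.inl rfl)
        rw [lkD_cons_self hq, lkD_of_not_mem _ _ hnxa]
        constructor
        · rintro (h | h)
          · exact ⟨Or.inr hmem, (key_eq_clause_right p y hq).1 h⟩
          · rcases h.1 with h' | h'
            · exact absurd h' hnxa
            · exact absurd h' hnb
        · rintro ⟨_, hv⟩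
          exact Or.inl ((key_eq_clause_right p y hq).2 hv)
      · rw [lkD_cons_ne hq]
        have hpy : p ≠ y := fun h => hq (by rw [h])
        simp [hq, hpy]
  | case6 x a y b hxy hyx ih =>
      have hkey : y.1 = x.1 := le_antisymm (not_lt.1 hxy) (not_lt.1 hyx)
      rw [pvMerge, if_neg hxy, if_neg hyx, pvConsIf_mem_iff,
        ih (List.Pairwise.sublist (List.sublist_cons_self x a) hla)
           (List.Pairwise.sublist (List.sublist_cons_self y b) hlb)]
      by_cases hq : p.1 = x.1
      · have hna : p.1 ∉ a.map Prod.fst := by rw [hq]; exact not_mem_of_pairwise_head hla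
        have hnb : p.1 ∉ b.map Prod.fst := by
          rw [hq, ← hkey]; exact not_mem_of_pairwise_head hlb
        have hmem : p.1 ∈ (x :: a).map Prod.fst := by
          rw [List.map_cons, hq]; exact List.mem_cons.2 (Or.inl rfl)
        rw [lkD_cons_self hq, lkD_cons_self (hq.trans hkey.symm)]
        constructor
        · rintro (⟨he, hne⟩ | h)
          · exact ⟨Or.inl hmem, by rw [he], by rw [he]; exact hne⟩
          · rcases h.1 with h' | h'
            · exact absurd h' hna
            · exact absurd h' hnb
        · rintro ⟨_, hv, hne⟩
          exact Or.inl ⟨Prod.ext hq hv, hv ▸ hne⟩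
      · rw [lkD_cons_ne hq, lkD_cons_ne (fun h => hq (h.trans hkey))]
        have hpx : p ≠ (x.1, pauli_mul_alt x.2 y.2) := fun h => hq (by rw [h])
        have hqy : ¬ p.1 = y.1 := fun h => hq (h.trans hkey)
        simp [hq, hqy, hpx]

lemma nodup_keys_pauli_dict (l : List (Int × String)) : (pauli_dict l).keys.Nodup :=
  PySem.Dict.nodup_keys_foldl_insert_key l (·.1) (fun _ p => p.2) PySem.Dict.empty
    (by simp [PySem.Dict.keys, PySem.Dict.empty])

lemma pauli_product_key_eq_alt (key1 key2 : List (Int × String)) :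
    pauli_product_key key1 key2 = pauli_product_key_alt key1 key2 := by
  show PySem.List.sorted2 ((List.foldl (fun d p => d.insert p.1 p.2) PySem.Dict.empty (List.filter (fun p => p.2 != "I") ((List.foldl (fun d q => d.insert q (pauli_product ((pauli_dict key1).getD q "I") ((pauli_dict key2).getD q "I"))) PySem.Dict.empty (PySem.Set.union (PySem.Set.ofList (pauli_dict key1).keys) (pauli_dict key2).keys)).items))).items) (·.1) (·.2) = pvMerge (PySem.List.sorted2 (PySem.Dict.ofList key1).items (·.1) (·.2)) (PySem.List.sorted2 (PySem.Dict.ofList key2).items (·.1) (·.2))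
  have hd1 : PySem.Dict.ofList key1 = pauli_dict key1 := rfl
  have hd2 : PySem.Dict.ofList key2 = pauli_dict key2 := rfl
  rw [hd1, hd2]
  set d1 := pauli_dict key1 with hdd1
  set d2 := pauli_dict key2 with hdd2
  have hnd1 : d1.keys.Nodup := nodup_keys_pauli_dict key1
  have hnd2 : d2.keys.Nodup := nodup_keys_pauli_dict key2
  set u := PySem.Set.union (PySem.Set.ofList d1.keys) d2.keys with hu
  have hnu : u.Nodup := PySem.Set.nodup_update _ _ (PySem.Set.nodup_ofList _)
  set g := fun q => (q, pauli_product (d1.getD q "I") (d2.getD q "I")) with hg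
  have hprod : (u.foldl (fun d q => d.insert q (pauli_product (d1.getD q "I") (d2.getD q "I"))) PySem.Dict.empty).items
      = u.map g := by
    have := PySem.Dict.items_foldl_insert_fresh u (fun q => q)
      (fun q => pauli_product (d1.getD q "I") (d2.getD q "I")) PySem.Dict.empty
      (fun a _ => rfl) (by simpa using hnu)
    simpa [hg] using this
  rw [hprod]
  set L := u.map g with hL
  have hLfst : L.map (·.1) = u := by simp [hL, hg, Function.comp_def]
  have hnfil : ((L.filter (fun p => p.2 != "I")).map (·.1)).Nodup := by
    have hsub : ((L.filter (fun p => p.2 != "I")).map (fun p : Int × String => p.1)).Sublist (L.map (fun p : Int × String => p.1)) :=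
      (List.filter_sublist (p := fun p : Int × String => p.2 != "I") (l := L)).map _
    exact hsub.nodup (hLfst ▸ hnu)
  have hprod2 : (((L.filter (fun p => p.2 != "I"))).foldl (fun d p => d.insert p.1 p.2) PySem.Dict.empty).items
      = L.filter (fun p => p.2 != "I") := by
    have := PySem.Dict.items_foldl_insert_fresh (L.filter (fun p => p.2 != "I")) (·.1) (·.2)
      PySem.Dict.empty (fun a _ => rfl) hnfil
    simpa using this
  rw [hprod2]
  have hinjM : ∀ x ∈ L.filter (fun p => p.2 != "I"), ∀ y ∈ L.filter (fun p => p.2 != "I"),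
      x.1 = y.1 → x = y := List.inj_on_of_nodup_map hnfil
  rw [sorted2_eq_sorted_fst _ hinjM]
  -- the B side: the two sorted item lists
  set la := PySem.List.sorted2 d1.items (·.1) (·.2) with hla0
  set lb := PySem.List.sorted2 d2.items (·.1) (·.2) with hlb0
  have hinj1 : ∀ x ∈ d1.items, ∀ y ∈ d1.items, x.1 = y.1 → x = y :=
    List.inj_on_of_nodup_map hnd1
  have hinj2 : ∀ x ∈ d2.items, ∀ y ∈ d2.items, x.1 = y.1 → x = y :=
    List.inj_on_of_nodup_map hnd2
  have hla1 : la = PySem.List.sorted d1.items (·.1) := sorted2_eq_sorted_fst _ hinj1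
  have hlb1 : lb = PySem.List.sorted d2.items (·.1) := sorted2_eq_sorted_fst _ hinj2
  have hperm1 : la.Perm d1.items := hla1 ▸ PySem.List.sorted_perm _ _ _
  have hperm2 : lb.Perm d2.items := hlb1 ▸ PySem.List.sorted_perm _ _ _
  have hkeys1 : d1.items.map Prod.fst = d1.keys := rfl
  have hkeys2 : d2.items.map Prod.fst = d2.keys := rfl
  have hnodmap1 : (la.map Prod.fst).Nodup := ((hperm1.map Prod.fst).nodup_iff).2 (hkeys1 ▸ hnd1)
  have hnodmap2 : (lb.map Prod.fst).Nodup := ((hperm2.map Prod.fst).nodup_iff).2 (hkeys2 ▸ hnd2)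
  have hlt1 : la.Pairwise (fun x y => x.1 < y.1) := by
    have hple : la.Pairwise (fun x y => x.1 ≤ y.1) := hla1 ▸ PySem.List.sorted_pairwise d1.items (·.1)
    have hpne : la.Pairwise (fun x y => x.1 ≠ y.1) := List.pairwise_map.1 hnodmap1
    exact (hple.and hpne).imp (fun h => lt_of_le_of_ne h.1 h.2)
  have hlt2 : lb.Pairwise (fun x y => x.1 < y.1) := by
    have hple : lb.Pairwise (fun x y => x.1 ≤ y.1) := hlb1 ▸ PySem.List.sorted_pairwise d2.items (·.1)
    have hpne : lb.Pairwise (fun x y => x.1 ≠ y.1) := List.pairwise_map.1 hnodmap2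
    exact (hple.and hpne).imp (fun h => lt_of_le_of_ne h.1 h.2)
  apply PySem.List.sorted_eq_of_perm_of_pairwise_lt
  · -- the merge is a permutation of the filtered product list
    apply List.perm_of_nodup_nodup_toFinset_eq
    · exact (pvMerge_pairwise la lb hlt1 hlt2).imp (fun h he => absurd (he ▸ h) (lt_irrefl _))
    · exact List.Nodup.of_map _ hnfil
    · apply Finset.ext
      intro x
      simp only [List.mem_toFinset]
      rw [pvMerge_mem la lb hlt1 hlt2]
      have e1 : lkD la x.1 = d1.getD x.1 "I" := lkD_eq_getD d1 la hperm1 x.1 hnd1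
      have e2 : lkD lb x.1 = d2.getD x.1 "I" := lkD_eq_getD d2 lb hperm2 x.1 hnd2
      have m1 : x.1 ∈ la.map Prod.fst ↔ x.1 ∈ d1.keys := by
        rw [(hperm1.map Prod.fst).mem_iff, hkeys1]
      have m2 : x.1 ∈ lb.map Prod.fst ↔ x.1 ∈ d2.keys := by
        rw [(hperm2.map Prod.fst).mem_iff, hkeys2]
      have hmu : x.1 ∈ u ↔ (x.1 ∈ d1.keys ∨ x.1 ∈ d2.keys) := by
        rw [hu, PySem.Set.mem_union]
        constructor
        · rintro (h | h)
          · exact Or.inl ((PySem.Set.mem_ofList _ _).1 h)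
          · exact Or.inr h
        · rintro (h | h)
          · exact Or.inl ((PySem.Set.mem_ofList _ _).2 h)
          · exact Or.inr h
      have hM : x ∈ L.filter (fun p => p.2 != "I") ↔
          (x.1 ∈ u ∧ x.2 = pauli_product (d1.getD x.1 "I") (d2.getD x.1 "I") ∧ x.2 ≠ "I") := by
        rw [List.mem_filter, hL, List.mem_map]
        constructor
        · rintro ⟨⟨q, hqu, hgq⟩, hne⟩
          have hq : q = x.1 := congrArg Prod.fst hgq
          subst hq
          exact ⟨hqu, (congrArg Prod.snd hgq).symm, by simpa using hne⟩
        · rintro ⟨hqu, hval, hne⟩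
          exact ⟨⟨x.1, hqu, Prod.ext rfl hval.symm⟩, by simpa using hne⟩
      rw [hM, e1, e2, m1, m2, ← pauli_mul_agree, hmu]
  · exact pvMerge_pairwise la lb hlt1 hlt2

-- ===== VERDICT (by name: the statement is the Claim_ definition above) =====
theorem pauli_product_key_spec : Claim_equal_pauli_product_key := by
  intro key1 key2 _
  unfold Spec_pauli_product_key
  exact pauli_product_key_eq_alt key1 key2
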